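-- pv_equiv track=rewrite | github.com/coding-for-kidz/web | core/spam_detector.py | shorten_word
-- ===== SOURCE A (Python) =====
-- def shorten_word(word: str) -> str:
--     """Shortens text"""
--     new_text = ""
--     previous = " "
--     exceptions = ["hit", "hello"]
--     if word in exceptions:
--         return word
--     for item in word:
--         if item not in "aeiou":
--             new_text += item
--         elif previous == " ":
--             new_text += item
--         previous = item
--     return new_text
-- ===== SOURCE B (Python) =====
-- def shorten_word(word: str) -> str:
--     """Shortens text"""
--     exceptions = ["hit", "hello"]
--     if word in exceptions:
--         return word
--     tokens = word.split(" ")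
--     out = []
--     for t in tokens:
--         out.append(t[:1] + "".join(c for c in t[1:] if c not in "aeiou"))
--     return " ".join(out)
-- ===== Notes on version B (the rewrite author's own statement) =====
-- stated objective: alternative
-- what changed: Replaces A's stateful character scan (keep a vowel iff the previous character was a space) by a stateless decomposition: split on the literal space, keep each token's first character and filter vowels from its remainder, rejoin with spaces.
import Mathlib
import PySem

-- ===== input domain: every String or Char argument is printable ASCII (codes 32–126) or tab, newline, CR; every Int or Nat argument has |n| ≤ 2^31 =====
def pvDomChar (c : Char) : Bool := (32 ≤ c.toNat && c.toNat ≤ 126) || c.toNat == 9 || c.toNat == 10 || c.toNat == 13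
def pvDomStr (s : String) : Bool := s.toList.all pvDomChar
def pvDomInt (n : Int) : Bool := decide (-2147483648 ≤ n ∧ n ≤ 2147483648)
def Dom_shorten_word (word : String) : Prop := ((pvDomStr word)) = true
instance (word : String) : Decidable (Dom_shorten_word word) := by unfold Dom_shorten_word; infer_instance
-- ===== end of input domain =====

-- B rewrites A's stateful previous-character scan as a split-on-space / per-token filter / join decomposition (objective: alternative).

-- shared tiny helper: Python's `c not in "aeiou"` for a single character (exact: 1-char substring test = membership)
def pvNotVowel (c : Char) : Bool := !("aeiou".toList.contains c)

-- ===== PORT A =====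
-- loop body of A: new_text/previous state, branches in A's order
def pvStepA (st : List Char × Char) (item : Char) : List Char × Char :=
  ( if pvNotVowel item then st.1 ++ [item]
    else if st.2 = ' ' then st.1 ++ [item]
    else st.1,
    item)

def shorten_word (word : String) : String :=
  if ["hit", "hello"].contains word then word
  else String.ofList ((word.toList.foldl pvStepA ([], ' ')).1)

-- ===== PORT B =====
-- B's per-token processing: t[:1] + filter of t[1:]
def pvProcTok (t : List Char) : List Char :=
  t.take 1 ++ (t.drop 1).filter pvNotVowel

def shorten_word_alt (word : String) : String :=
  if ["hit", "hello"].contains word then word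
  else String.ofList (PySem.Chars.join [' '] ((PySem.Chars.splitOn word.toList [' ']).map pvProcTok))

-- ===== PRECONDITION & SPEC =====
def Spec_shorten_word (word : String) (out : String) : Prop := out = shorten_word_alt word
instance (word : String) (out : String) : Decidable (Spec_shorten_word word out) := by unfold Spec_shorten_word; infer_instance

-- ===== CLAIM (what is proved, stated in full; the proofs are below) =====
def Claim_equal_shorten_word : Prop := ∀ (word : String), Dom_shorten_word word → Spec_shorten_word word (shorten_word word)

-- ===== LEMMAS AND PROOFS =====

-- characterization of A's scan: emitted characters, previous as parameter
def aScan : List Char → Char → List Char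
  | [], _ => []
  | c :: cs, prev =>
      (if pvNotVowel c then [c] else if prev = ' ' then [c] else []) ++ aScan cs c

lemma foldl_aScan (cs : List Char) (acc : List Char) (prev : Char) :
    (cs.foldl pvStepA (acc, prev)).1 = acc ++ aScan cs prev := by
  induction cs generalizing acc prev with
  | nil => simp [aScan]
  | cons c cs ih =>
      simp only [List.foldl_cons, aScan, pvStepA]
      split_ifs with h1 h2 <;> simp [ih, List.append_assoc]

-- split on a single space, head token and remaining tokens
def fSplit : List Char → List Char × List (List Char)
  | [] => ([], [])
  | c :: cs =>
      let (t, ts) := fSplit cs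
      if c = ' ' then ([], t :: ts) else (c :: t, ts)

-- join of the tail tokens (each processed), with a leading separator per token
def jt : List (List Char) → List Char
  | [] => []
  | t :: ts => ' ' :: (pvProcTok t ++ jt ts)

lemma go_spec (fuel : Nat) (l cur : List Char) (acc : List (List Char)) (h : l.length < fuel) :
    PySem.Chars.splitOn.go [' '] fuel l cur acc
      = acc.reverse ++ (cur.reverse ++ (fSplit l).1) :: (fSplit l).2 := by
  induction fuel generalizing l cur acc with
  | zero => omega
  | succ f ih =>
      cases l with
      | nil => simp [PySem.Chars.splitOn.go, fSplit]
      | cons c rest =>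
          simp only [List.length_cons] at h
          by_cases hc : c = ' '
          · subst hc
            rw [show PySem.Chars.splitOn.go [' '] (f+1) (' ' :: rest) cur acc
                  = PySem.Chars.splitOn.go [' '] f rest [] (cur.reverse :: acc) from by
                  simp [PySem.Chars.splitOn.go, List.isPrefixOf]]
            rw [ih rest [] (cur.reverse :: acc) (by omega)]
            simp [fSplit]
          · rw [show PySem.Chars.splitOn.go [' '] (f+1) (c :: rest) cur acc
                  = PySem.Chars.splitOn.go [' '] f rest (c :: cur) acc from by
                  have hne : (' ' = c) = False := by
                    simp [eq_comm, hc]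
                  simp [PySem.Chars.splitOn.go, List.isPrefixOf, hne]]
            rw [ih rest (c :: cur) acc (by omega)]
            simp [fSplit, hc]

lemma splitOn_space (cs : List Char) :
    PySem.Chars.splitOn cs [' '] = (fSplit cs).1 :: (fSplit cs).2 := by
  unfold PySem.Chars.splitOn
  rw [go_spec (cs.length + 1) cs [] [] (by omega)]
  simp

lemma join_map_cons (t : List Char) (ts : List (List Char)) :
    PySem.Chars.join [' '] ((t :: ts).map pvProcTok) = pvProcTok t ++ jt ts := by
  induction ts generalizing t with
  | nil => simp [PySem.Chars.join_singleton, jt]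
  | cons t' ts ih =>
      rw [List.map_cons, List.map_cons, PySem.Chars.join_cons_cons]
      rw [show (pvProcTok t' :: ts.map pvProcTok) = (t' :: ts).map pvProcTok from rfl, ih]
      simp [jt]

lemma main_scan (cs : List Char) :
    aScan cs ' ' = pvProcTok (fSplit cs).1 ++ jt (fSplit cs).2
    ∧ ∀ prev, prev ≠ ' ' → aScan cs prev = (fSplit cs).1.filter pvNotVowel ++ jt (fSplit cs).2 := by
  induction cs with
  | nil => simp [aScan, fSplit, pvProcTok, jt]
  | cons c cs ih =>
      obtain ⟨ihF, ihG⟩ := ih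
      by_cases hc : c = ' '
      · subst hc
        have hnv : pvNotVowel ' ' = true := by decide
        constructor
        · simp [aScan, fSplit, hnv, jt, pvProcTok, ihF]
        · intro prev hp
          simp [aScan, fSplit, hnv, jt, pvProcTok, ihF]
      · have hsp : aScan cs c = (fSplit cs).1.filter pvNotVowel ++ jt (fSplit cs).2 := ihG c hc
        constructor
        · simp only [aScan, fSplit, if_neg hc]
          simp [pvProcTok, hsp]
        · intro prev hp
          simp only [aScan, fSplit, if_neg hc]
          by_cases hv : pvNotVowel c
          · simp [hv, hsp]
          · simp [hv, hp, hsp]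

-- ===== VERDICT (by name: the statement is the Claim_ definition above) =====
theorem shorten_word_spec : Claim_equal_shorten_word := by
  intro word _
  unfold Spec_shorten_word shorten_word shorten_word_alt
  split_ifs with h
  · rfl
  · congr 1
    rw [foldl_aScan, List.nil_append, splitOn_space, join_map_cons]
    exact (main_scan word.toList).1
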